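-- pv_equiv track=rewrite | github.com/markjvillanueva3-cloud/PRISMV9 | _SCRIPTS/dependency_mapper.py | find_circular_dependencies
-- ===== SOURCE A (Python) =====
-- def find_circular_dependencies(modules):
--     """Find circular dependency chains"""
--     circular = []
--
--     def find_cycles(start, current, visited, path):
--         if current in visited:
--             if current == start and len(path) > 1:
--                 circular.append(path[:])
--             return
--
--         visited.add(current)
--         path.append(current)
--
--         for dep in modules.get(current, {}).get('internal_deps', []):
--             find_cycles(start, dep, visited.copy(), path[:])
--
--     for mod_path in modules:
--         find_cycles(mod_path, mod_path, set(), [])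
--
--     # Remove duplicates
--     unique_circular = []
--     seen = set()
--     for cycle in circular:
--         key = tuple(sorted(cycle))
--         if key not in seen:
--             seen.add(key)
--             unique_circular.append(cycle)
--
--     return unique_circular
-- ===== SOURCE B (Python) =====
-- def find_circular_dependencies(modules):
--     """Find circular dependency chains (iterative DFS with an explicit frame stack)."""
--     circular = []
--     for start in modules:
--         stack = [(start, [])]
--         while stack:
--             current, path = stack.pop()
--             if current in path:
--                 if current == start and len(path) > 1:
--                     circular.append(path)
--                 continue
--             new_path = path + [current]
--             for dep in reversed(modules.get(current, {}).get('internal_deps', [])):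
--                 stack.append((dep, new_path))
--     unique = {}
--     for cycle in circular:
--         unique.setdefault(tuple(sorted(cycle)), cycle)
--     return list(unique.values())
-- ===== Notes on version B (the rewrite author's own statement) =====
-- stated objective: alternative
-- what changed: The recursive DFS (one call frame per node, carrying a per-branch visited set) is replaced by an iterative DFS over an explicit stack of (node, path) frames that carries only the path (the visited set always equals it), and the final dedup uses a first-wins dict (setdefault) instead of a seen-set plus output list.
import Mathlib
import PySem

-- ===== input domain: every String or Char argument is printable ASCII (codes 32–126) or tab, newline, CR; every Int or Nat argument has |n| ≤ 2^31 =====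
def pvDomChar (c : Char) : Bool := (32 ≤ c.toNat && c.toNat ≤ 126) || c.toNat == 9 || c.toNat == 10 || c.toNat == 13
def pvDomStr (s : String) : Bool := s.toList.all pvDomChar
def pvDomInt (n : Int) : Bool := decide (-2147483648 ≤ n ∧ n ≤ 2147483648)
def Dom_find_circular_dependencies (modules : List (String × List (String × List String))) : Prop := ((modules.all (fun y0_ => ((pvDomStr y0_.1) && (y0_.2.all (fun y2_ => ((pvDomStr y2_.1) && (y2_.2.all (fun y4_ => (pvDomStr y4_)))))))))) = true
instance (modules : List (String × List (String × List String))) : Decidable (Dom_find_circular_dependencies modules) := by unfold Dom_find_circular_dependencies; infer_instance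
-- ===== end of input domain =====

-- B rewrites A's recursive DFS as an iterative DFS over an explicit stack of (node, path) frames
-- (carrying only the path, since A's per-branch visited set always equals the path) and dedups via a
-- first-wins dict instead of a seen-set plus output list; objective: alternative (same cost).

-- ===== PORT A =====
-- shared helper: the Python expression `modules.get(current, {}).get('internal_deps', [])`,
-- identical in Source A and Source B
def pvDeps (modules : List (String × List (String × List String))) (c : String) : List String :=
  (PySem.Dict.mk ((PySem.Dict.mk modules).getD c [])).getD "internal_deps" []

-- every name that can ever appear as a DFS node (keys and listed deps); used only to size the fuel
def pvNodes (modules : List (String × List (String × List String))) : List String :=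
  modules.flatMap (fun m => m.1 :: m.2.flatMap (fun e => e.2))

def pvU (modules : List (String × List (String × List String))) : Nat :=
  (PySem.List.dedup (pvNodes modules)).length

-- A's recursive find_cycles; the fuel is a totality guard only (the recursion adds a node to
-- visited at each level, so depth never exceeds pvU + 1 and the fuel pvU + 2 is never exhausted)
def pvFindCyclesA (modules : List (String × List (String × List String))) (start : String) :
    Nat → String → PySem.Set String → List String → List (List String)
  | 0, _, _, _ => []
  | fuel+1, current, visited, path =>
    if PySem.Set.contains visited current then
      if current = start ∧ 1 < path.length then [path] else []
    else
      let visited' := PySem.Set.add visited current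
      let path' := path ++ [current]
      (pvDeps modules current).foldl
        (fun acc dep => acc ++ pvFindCyclesA modules start fuel dep visited' path') []

def find_circular_dependencies (modules : List (String × List (String × List String))) : List (List String) :=
  let circular := ((PySem.Dict.mk modules).keys).foldl
    (fun acc start => acc ++ pvFindCyclesA modules start (pvU modules + 2) start PySem.Set.empty []) []
  let res := circular.foldl
    (fun (st : PySem.Set (List String) × List (List String)) cycle =>
      let key := PySem.List.sorted cycle (fun x => x) false
      if PySem.Set.contains st.1 key then st
      else (PySem.Set.add st.1 key, st.2 ++ [cycle]))
    (PySem.Set.empty, [])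
  res.2

-- ===== PORT B =====
-- B-side fuel for the while loop: total number of loop iterations spent on one start is bounded by
-- (max out-degree + 1) ^ (pvU + 2); again a totality guard only
def pvMaxDeps (modules : List (String × List (String × List String))) : Nat :=
  (modules.map (fun m => ((PySem.Dict.mk m.2).getD "internal_deps" []).length)).foldl max 0

def pvFuelB (modules : List (String × List (String × List String))) : Nat :=
  (pvMaxDeps modules + 1) ^ (pvU modules + 2)

-- the `while stack:` loop of Source B; frames are (current, path), head of the list = top of the stack
def pvLoopB (modules : List (String × List (String × List String))) (start : String) :
    Nat → List (String × List String) → List (List String) → List (List String)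
  | 0, _, circular => circular
  | _+1, [], circular => circular
  | fuel+1, (current, path) :: stack, circular =>
    if path.contains current then
      pvLoopB modules start fuel stack
        (if current = start ∧ 1 < path.length then circular ++ [path] else circular)
    else
      let newPath := path ++ [current]
      pvLoopB modules start fuel
        ((pvDeps modules current).reverse.foldl (fun st dep => (dep, newPath) :: st) stack)
        circular

def find_circular_dependencies_alt (modules : List (String × List (String × List String))) : List (List String) :=
  let circular := ((PySem.Dict.mk modules).keys).foldl
    (fun acc start => pvLoopB modules start (pvFuelB modules) [(start, [])] acc) []
  let unique := circular.foldl
    (fun d cycle => PySem.Dict.setdefault d (PySem.List.sorted cycle (fun x => x) false) cycle)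
    (PySem.Dict.mk [])
  unique.values

-- ===== PRECONDITION & SPEC =====
def Spec_find_circular_dependencies (modules : List (String × List (String × List String))) (out : List (List String)) : Prop := out = find_circular_dependencies_alt modules
instance (modules : List (String × List (String × List String))) (out : List (List String)) : Decidable (Spec_find_circular_dependencies modules out) := by unfold Spec_find_circular_dependencies; infer_instance

-- ===== CLAIM (what is proved, stated in full; the proofs are below) =====
def Claim_equal_find_circular_dependencies : Prop := ∀ (modules : List (String × List (String × List String))), Dom_find_circular_dependencies modules → Spec_find_circular_dependencies modules (find_circular_dependencies modules)

-- ===== LEMMAS AND PROOFS =====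

-- invariant carried by every DFS state: the node and all path entries are known names, path has no repeats
def pvInv (modules : List (String × List (String × List String))) (c : String) (p : List String) : Prop :=
  c ∈ pvNodes modules ∧ p.Nodup ∧ ∀ x ∈ p, x ∈ pvNodes modules

-- per-frame iteration count of Source B's loop, fueled like pvFindCyclesA
def pvCost (modules : List (String × List (String × List String))) : Nat → String → List String → Nat
  | 0, _, _ => 1
  | n+1, c, p =>
    if c ∈ p then 1
    else 1 + ((pvDeps modules c).map (fun d => pvCost modules n d (p ++ [c]))).sum

theorem pvDeps_subset (modules : List (String × List (String × List String))) (c : String) :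
    ∀ x ∈ pvDeps modules c, x ∈ pvNodes modules := by
  intro x hx
  unfold pvDeps PySem.Dict.getD PySem.Dict.get? at hx
  rcases h1 : List.find? (fun p => p.1 == c) modules with _ | ⟨k, v⟩
  · simp [h1] at hx
  · simp only [h1, Option.map_some, Option.getD_some] at hx
    rcases h2 : List.find? (fun p => p.1 == "internal_deps") v with _ | ⟨k2, ds⟩
    · simp [h2] at hx
    · simp only [h2, Option.map_some, Option.getD_some] at hx
      have hv : (k, v) ∈ modules := List.mem_of_find?_eq_some h1
      have hds : (k2, ds) ∈ v := List.mem_of_find?_eq_some h2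
      unfold pvNodes
      refine List.mem_flatMap.mpr ⟨(k, v), hv, ?_⟩
      exact List.mem_cons_of_mem _ (List.mem_flatMap.mpr ⟨(k2, ds), hds, hx⟩)

theorem pvDeps_len_le (modules : List (String × List (String × List String))) (c : String) :
    (pvDeps modules c).length ≤ pvMaxDeps modules := by
  unfold pvDeps pvMaxDeps PySem.Dict.getD PySem.Dict.get?
  rcases h1 : List.find? (fun p => p.1 == c) modules with _ | ⟨k, v⟩
  · simp [h1]
  · simp only [h1, Option.map_some, Option.getD_some]
    have hv : (k, v) ∈ modules := List.mem_of_find?_eq_some h1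
    have hm : ((PySem.Dict.mk v).getD "internal_deps" []).length ∈
        modules.map (fun m => ((PySem.Dict.mk m.2).getD "internal_deps" []).length) :=
      List.mem_map_of_mem hv
    have := (PySem.List.le_foldl_max
      (modules.map (fun m => ((PySem.Dict.mk m.2).getD "internal_deps" []).length)) 0).2 _ hm
    simpa [PySem.Dict.getD, PySem.Dict.get?] using this

theorem pvPath_len_le (modules : List (String × List (String × List String))) {p : List String}
    (h1 : p.Nodup) (h2 : ∀ x ∈ p, x ∈ pvNodes modules) : p.length ≤ pvU modules := by
  have hsub : p ⊆ PySem.List.dedup (pvNodes modules) := by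
    intro x hx
    exact (PySem.List.mem_dedup _ _).mpr (h2 x hx)
  exact (List.subperm_of_subset h1 hsub).length_le

theorem pvCyclesA_fuel (modules : List (String × List (String × List String))) (start : String) :
    ∀ n m c p, pvInv modules c p → pvU modules + 1 ≤ n + p.length → pvU modules + 1 ≤ m + p.length →
      pvFindCyclesA modules start n c p p = pvFindCyclesA modules start m c p p := by
  intro n
  induction n with
  | zero =>
    intro m c p hinv hn _
    have := pvPath_len_le modules hinv.2.1 hinv.2.2
    omega
  | succ n ih =>
    intro m c p hinv hn hm
    cases m with
    | zero =>
      have := pvPath_len_le modules hinv.2.1 hinv.2.2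
      omega
    | succ m =>
      by_cases hc : c ∈ p
      · simp [pvFindCyclesA, hc]
      · simp only [pvFindCyclesA, PySem.Set.contains_iff p c, hc,
          PySem.Set.add_of_not_mem hc, if_false]
        apply PySem.List.foldl_congr_mem
        intro acc d hd
        congr 1
        refine ih m d (p ++ [c]) ⟨pvDeps_subset modules c d hd, ?_, ?_⟩ ?_ ?_
        · rw [List.nodup_append]
          refine ⟨hinv.2.1, by simp, ?_⟩
          intro a ha b hb
          have hbc : b = c := by simpa using hb
          subst hbc
          exact fun h => hc (h ▸ ha)
        · intro x hx
          rcases List.mem_append.mp hx with h | h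
          · exact hinv.2.2 x h
          · simp at h; subst h; exact hinv.1
        · simp; omega
        · simp; omega

theorem pvCost_fuel (modules : List (String × List (String × List String))) :
    ∀ n m c p, pvInv modules c p → pvU modules + 1 ≤ n + p.length → pvU modules + 1 ≤ m + p.length →
      pvCost modules n c p = pvCost modules m c p := by
  intro n
  induction n with
  | zero =>
    intro m c p hinv hn _
    have := pvPath_len_le modules hinv.2.1 hinv.2.2
    omega
  | succ n ih =>
    intro m c p hinv hn hm
    cases m with
    | zero =>
      have := pvPath_len_le modules hinv.2.1 hinv.2.2
      omega
    | succ m =>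
      by_cases hc : c ∈ p
      · simp [pvCost, hc]
      · simp only [pvCost, hc, if_false]
        congr 1
        apply congrArg List.sum
        apply List.map_congr_left
        intro d hd
        refine ih m d (p ++ [c]) ⟨pvDeps_subset modules c d hd, ?_, ?_⟩ ?_ ?_
        · rw [List.nodup_append]
          refine ⟨hinv.2.1, by simp, ?_⟩
          intro a ha b hb
          have hbc : b = c := by simpa using hb
          subst hbc
          exact fun h => hc (h ▸ ha)
        · intro x hx
          rcases List.mem_append.mp hx with h | h
          · exact hinv.2.2 x h
          · simp at h; subst h; exact hinv.1
        · simp; omega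
        · simp; omega

theorem pvSumLe (l : List Nat) (n : Nat) (h : ∀ x ∈ l, x ≤ n) : l.sum ≤ l.length * n := by
  induction l with
  | nil => simp
  | cons a t ih =>
    simp only [List.sum_cons, List.length_cons]
    have := ih (fun x hx => h x (List.mem_cons_of_mem _ hx))
    have ha := h a List.mem_cons_self
    nlinarith

theorem pvCost_pos (modules : List (String × List (String × List String))) (n : Nat) (c : String)
    (p : List String) : 1 ≤ pvCost modules n c p := by
  cases n with
  | zero => simp [pvCost]
  | succ n => by_cases hc : c ∈ p <;> simp [pvCost, hc]

theorem pvCost_le (modules : List (String × List (String × List String))) :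
    ∀ n c p, pvCost modules n c p ≤ (pvMaxDeps modules + 1) ^ n := by
  intro n
  induction n with
  | zero => intro c p; simp [pvCost]
  | succ n ih =>
    intro c p
    by_cases hc : c ∈ p
    · simpa [pvCost, hc] using Nat.one_le_pow _ _ (Nat.succ_pos _)
    · simp only [pvCost, hc, if_false]
      have hsum : ((pvDeps modules c).map (fun d => pvCost modules n d (p ++ [c]))).sum ≤
          (pvDeps modules c).length * (pvMaxDeps modules + 1) ^ n := by
        have hlen : ((pvDeps modules c).map (fun d => pvCost modules n d (p ++ [c]))).length
            = (pvDeps modules c).length := List.length_map ..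
        calc ((pvDeps modules c).map (fun d => pvCost modules n d (p ++ [c]))).sum
            ≤ ((pvDeps modules c).map (fun d => pvCost modules n d (p ++ [c]))).length *
              (pvMaxDeps modules + 1) ^ n := by
              apply pvSumLe
              intro x hx
              rcases List.mem_map.mp hx with ⟨d, _, rfl⟩
              exact ih d (p ++ [c])
          _ = _ := by rw [hlen]
      have hD := pvDeps_len_le modules c
      have hpow : 1 ≤ (pvMaxDeps modules + 1) ^ n := Nat.one_le_pow _ _ (Nat.succ_pos _)
      calc 1 + ((pvDeps modules c).map (fun d => pvCost modules n d (p ++ [c]))).sum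
          ≤ 1 + (pvDeps modules c).length * (pvMaxDeps modules + 1) ^ n := by omega
        _ ≤ (pvMaxDeps modules + 1) ^ (n + 1) := by
            rw [pow_succ]
            have : (pvDeps modules c).length * (pvMaxDeps modules + 1) ^ n ≤
                pvMaxDeps modules * (pvMaxDeps modules + 1) ^ n :=
              Nat.mul_le_mul_right _ hD
            nlinarith

theorem pvRevPush (q : List String) (l : List String) (st : List (String × List String)) :
    l.reverse.foldl (fun st d => (d, q) :: st) st = l.map (fun d => (d, q)) ++ st := by
  induction l using List.reverseRecOn with
  | nil => simp
  | append_singleton t a ih => simp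

theorem pvLoopB_sim (modules : List (String × List (String × List String))) (start : String) :
    ∀ fb frames circ, (∀ f ∈ frames, pvInv modules f.1 f.2) →
      (frames.map (fun f => pvCost modules (pvU modules + 2) f.1 f.2)).sum ≤ fb →
      pvLoopB modules start fb frames circ =
        circ ++ (frames.map (fun f =>
          pvFindCyclesA modules start (pvU modules + 2) f.1 f.2 f.2)).flatten := by
  intro fb
  induction fb using Nat.strong_induction_on with
  | _ fb ih =>
    intro frames circ hinv hcost
    match frames with
    | [] => cases fb <;> simp [pvLoopB]
    | (c, p) :: fs =>
      have hinv0 : pvInv modules c p := hinv (c, p) List.mem_cons_self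
      have h1 : 1 ≤ pvCost modules (pvU modules + 2) c p := pvCost_pos modules _ c p
      simp only [List.map_cons, List.sum_cons] at hcost
      obtain ⟨fb', rfl⟩ : ∃ fb', fb = fb' + 1 := ⟨fb - 1, by omega⟩
      by_cases hc : c ∈ p
      · have hcost1 : pvCost modules (pvU modules + 2) c p = 1 := by simp [pvCost, hc]
        have hA : pvFindCyclesA modules start (pvU modules + 2) c p p =
            if c = start ∧ 1 < p.length then [p] else [] := by
          simp [pvFindCyclesA, hc]
        have hstep : pvLoopB modules start (fb' + 1) ((c, p) :: fs) circ =
            pvLoopB modules start fb' fs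
              (if c = start ∧ 1 < p.length then circ ++ [p] else circ) := by
          simp [pvLoopB, hc]
        rw [hstep, ih fb' (by omega) fs _ (fun f hf => hinv f (List.mem_cons_of_mem _ hf))
          (by omega)]
        simp only [List.map_cons, List.flatten_cons, hA]
        by_cases hcs : c = start ∧ 1 < p.length <;> simp [hcs]
      · have hfuelc : ∀ d ∈ pvDeps modules c,
            pvCost modules (pvU modules + 1) d (p ++ [c]) =
              pvCost modules (pvU modules + 2) d (p ++ [c]) := by
          intro d hd
          refine pvCost_fuel modules _ _ d (p ++ [c])
            ⟨pvDeps_subset modules c d hd, ?_, ?_⟩ (by simp only [List.length_append]; omega) (by simp only [List.length_append]; omega)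
          · rw [List.nodup_append]
            refine ⟨hinv0.2.1, by simp, ?_⟩
            intro a ha b hb
            have hbc : b = c := by simpa using hb
            subst hbc
            exact fun h => hc (h ▸ ha)
          · intro x hx
            rcases List.mem_append.mp hx with h | h
            · exact hinv0.2.2 x h
            · simp at h; subst h; exact hinv0.1
        have hfuelA : ∀ d ∈ pvDeps modules c,
            pvFindCyclesA modules start (pvU modules + 1) d (p ++ [c]) (p ++ [c]) =
              pvFindCyclesA modules start (pvU modules + 2) d (p ++ [c]) (p ++ [c]) := by
          intro d hd
          refine pvCyclesA_fuel modules start _ _ d (p ++ [c])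
            ⟨pvDeps_subset modules c d hd, ?_, ?_⟩ (by simp only [List.length_append]; omega) (by simp only [List.length_append]; omega)
          · rw [List.nodup_append]
            refine ⟨hinv0.2.1, by simp, ?_⟩
            intro a ha b hb
            have hbc : b = c := by simpa using hb
            subst hbc
            exact fun h => hc (h ▸ ha)
          · intro x hx
            rcases List.mem_append.mp hx with h | h
            · exact hinv0.2.2 x h
            · simp at h; subst h; exact hinv0.1
        have hcostc : pvCost modules (pvU modules + 2) c p =
            1 + ((pvDeps modules c).map
              (fun d => pvCost modules (pvU modules + 2) d (p ++ [c]))).sum := by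
          simp only [pvCost, hc, if_false]
          exact congrArg (1 + ·) (congrArg List.sum (List.map_congr_left hfuelc))
        have hA : pvFindCyclesA modules start (pvU modules + 2) c p p =
            ((pvDeps modules c).map
              (fun d => pvFindCyclesA modules start (pvU modules + 2) d (p ++ [c]) (p ++ [c]))).flatten := by
          simp only [pvFindCyclesA, PySem.Set.contains_iff p c, hc,
            PySem.Set.add_of_not_mem hc, if_false]
          rw [PySem.List.foldl_append_eq_flatMap]
          rw [List.flatMap_def, List.nil_append]
          exact congrArg List.flatten (List.map_congr_left hfuelA)
        have hstep : pvLoopB modules start (fb' + 1) ((c, p) :: fs) circ =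
            pvLoopB modules start fb'
              ((pvDeps modules c).map (fun d => (d, p ++ [c])) ++ fs) circ := by
          simp only [pvLoopB, List.contains_iff_mem, hc]
          rw [if_neg (by simp)]
          rw [pvRevPush]
        rw [hstep]
        rw [ih fb' (by omega) _ circ ?_ ?_]
        · simp only [List.map_append, List.flatten_append, List.map_cons, List.flatten_cons,
            List.map_map, hA]
          simp [Function.comp_def]
        · intro f hf
          rcases List.mem_append.mp hf with h | h
          · rcases List.mem_map.mp h with ⟨d, hd, rfl⟩
            refine ⟨pvDeps_subset modules c d hd, ?_, ?_⟩
            · rw [List.nodup_append]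
              refine ⟨hinv0.2.1, by simp, ?_⟩
              intro a ha b hb
              have hbc : b = c := by simpa using hb
              subst hbc
              exact fun h => hc (h ▸ ha)
            · intro x hx
              rcases List.mem_append.mp hx with h | h
              · exact hinv0.2.2 x h
              · simp at h; subst h; exact hinv0.1
          · exact hinv f (List.mem_cons_of_mem _ h)
        · rw [List.map_append, List.sum_append, List.map_map]
          have : ((pvDeps modules c).map
              ((fun f => pvCost modules (pvU modules + 2) f.1 f.2) ∘
                (fun d => (d, p ++ [c])))).sum =
              ((pvDeps modules c).map
                (fun d => pvCost modules (pvU modules + 2) d (p ++ [c]))).sum := by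
            simp [Function.comp_def]
          rw [this]
          omega

theorem pvDedup_eq (C : List (List String)) :
    ∀ L : List (List String × List String),
      (C.foldl
        (fun (st : PySem.Set (List String) × List (List String)) cycle =>
          let key := PySem.List.sorted cycle (fun x => x) false
          if PySem.Set.contains st.1 key then st
          else (PySem.Set.add st.1 key, st.2 ++ [cycle]))
        (L.map Prod.fst, L.map Prod.snd)).2 =
      (C.foldl
        (fun d cycle => PySem.Dict.setdefault d (PySem.List.sorted cycle (fun x => x) false) cycle)
        (PySem.Dict.mk L)).values := by
  induction C with
  | nil => intro L; simp [PySem.Dict.values]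
  | cons c C ih =>
    intro L
    simp only [List.foldl_cons]
    by_cases hk : PySem.List.sorted c (fun x => x) false ∈ L.map Prod.fst
    · have hb : PySem.Set.contains (L.map Prod.fst) (PySem.List.sorted c (fun x => x) false) = true :=
        (PySem.Set.contains_iff _ _).mpr hk
      have hd : (PySem.Dict.mk L).contains (PySem.List.sorted c (fun x => x) false) = true := by
        simp only [PySem.Dict.contains, List.any_eq_true]
        rcases List.mem_map.mp hk with ⟨pr, hpr, hfst⟩
        exact ⟨pr, hpr, by simp [hfst]⟩
      simp only [hb, if_true, PySem.Dict.setdefault, hd]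
      exact ih L
    · have hb : PySem.Set.contains (L.map Prod.fst) (PySem.List.sorted c (fun x => x) false) = false := by
        rw [Bool.eq_false_iff]
        intro h
        exact hk ((PySem.Set.contains_iff _ _).mp h)
      have hd : (PySem.Dict.mk L).contains (PySem.List.sorted c (fun x => x) false) = false := by
        rw [Bool.eq_false_iff]
        intro h
        simp only [PySem.Dict.contains, List.any_eq_true] at h
        rcases h with ⟨pr, hpr, he⟩
        exact hk (List.mem_map.mpr ⟨pr, hpr, by simpa using he⟩)
      have hadd : PySem.Set.add (L.map Prod.fst) (PySem.List.sorted c (fun x => x) false) =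
          L.map Prod.fst ++ [PySem.List.sorted c (fun x => x) false] :=
        PySem.Set.add_of_not_mem hk
      simp only [hb, Bool.false_eq_true, if_false, PySem.Dict.setdefault, hd, hadd]
      have := ih (L ++ [(PySem.List.sorted c (fun x => x) false, c)])
      simpa using this

-- ===== VERDICT (by name: the statement is the Claim_ definition above) =====
theorem find_circular_dependencies_spec : Claim_equal_find_circular_dependencies := by
  intro modules _
  unfold Spec_find_circular_dependencies find_circular_dependencies find_circular_dependencies_alt
  have hcirc :
      ((PySem.Dict.mk modules).keys).foldl
        (fun acc start => acc ++ pvFindCyclesA modules start (pvU modules + 2) start PySem.Set.empty []) [] =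
      ((PySem.Dict.mk modules).keys).foldl
        (fun acc start => pvLoopB modules start (pvFuelB modules) [(start, [])] acc) [] := by
    refine PySem.List.foldl_congr_mem _ _ _ _ ?_
    intro acc s hs
    have hsN : s ∈ pvNodes modules := by
      simp only [PySem.Dict.keys] at hs
      rcases List.mem_map.mp hs with ⟨m, hm, rfl⟩
      exact List.mem_flatMap.mpr ⟨m, hm, List.mem_cons_self⟩
    rw [pvLoopB_sim modules s (pvFuelB modules) [(s, [])] acc ?_ ?_]
    · simp [PySem.Set.empty]
    · intro f hf
      have hf' : f = (s, []) := by simpa using hf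
      subst hf'
      exact ⟨hsN, List.nodup_nil, by simp⟩
    · simpa [pvFuelB] using pvCost_le modules (pvU modules + 2) s []
  simp only [hcirc]
  exact pvDedup_eq _ []
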